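-- pv_equiv track=rewrite | github.com/Franklyn-S/listas-FUP | Lista 6 FUP - Recursão/Códigos Python/1.12.py | maiorElem
-- ===== SOURCE A (Python) =====
-- def maiorElem(t, maior):
-- 	if t == 0:
-- 		return 0
-- 	elif t == 1:
-- 		return maior
-- 	else:
-- 		if n[t-1] > maior:
-- 			return(maiorElem(t-1, n[t-1]))
-- 		else:
-- 			return(maiorElem(t-1, maior))
--
-- n = [-1, -2, -6, -5]
-- ===== SOURCE B (Python) =====
-- n = [-1, -2, -6, -5]
--
--
-- def maiorElem(t, maior):
--     if t == 0:
--         return 0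
--     while t != 1:
--         if n[t - 1] > maior:
--             maior = n[t - 1]
--         t = t - 1
--     return maior
-- ===== Notes on version B (the rewrite author's own statement) =====
-- stated objective: alternative
-- what changed: Replaces the tail recursion (which threads the running maximum through recursive calls) by an explicit while-loop that mutates the accumulator in place and decrements t, keeping the exact indexing n[t-1] so edge behaviour (t==0 -> 0, n[0] never read, IndexError outside 0..4) is preserved.
import Mathlib
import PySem

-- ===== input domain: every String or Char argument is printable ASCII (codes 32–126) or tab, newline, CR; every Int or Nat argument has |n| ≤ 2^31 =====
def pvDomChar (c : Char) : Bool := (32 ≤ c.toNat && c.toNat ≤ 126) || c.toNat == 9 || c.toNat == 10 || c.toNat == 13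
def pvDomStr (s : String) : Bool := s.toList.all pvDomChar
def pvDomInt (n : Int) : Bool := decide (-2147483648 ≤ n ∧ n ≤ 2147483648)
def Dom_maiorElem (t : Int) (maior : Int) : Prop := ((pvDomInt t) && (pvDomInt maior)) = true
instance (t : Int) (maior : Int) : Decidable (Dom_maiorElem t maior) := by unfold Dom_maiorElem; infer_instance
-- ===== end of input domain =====

-- B turns the tail recursion into an explicit while-loop with an in-place accumulator (same values, same edge behaviour).

-- ===== PORT A =====
-- the module-level global n = [-1, -2, -6, -5]
def pvN : List Int := [-1, -2, -6, -5]

-- A's recursion on t, realised on t.toNat (A only terminates for 0 ≤ t ≤ 4;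
-- the `none => 0` arm is the IndexError case, excluded by Pre_, as is t < 0 where A recurses into an IndexError)
def maiorElemGo : Nat → Int → Int
  | 0, _ => 0
  | 1, maior => maior
  | (k+2), maior =>
      match PySem.List.pyGet? pvN ((k : Int) + 1) with
      | none => 0
      | some x => if x > maior then maiorElemGo (k+1) x else maiorElemGo (k+1) maior

def maiorElem (t : Int) (maior : Int) : Int :=
  if t < 0 then 0 else maiorElemGo t.toNat maior

-- ===== PORT B =====
-- the while-loop of B: k iterations remain (k = t - 1); iteration with k+1 remaining reads n[k+1],
-- updates the accumulator in place and decrements; pyGetD's default is the IndexError case, excluded by Pre_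
def maiorElemLoop : Nat → Int → Int
  | 0, maior => maior
  | (k+1), maior =>
      maiorElemLoop k (if PySem.List.pyGetD pvN ((k : Int) + 1) 0 > maior
                       then PySem.List.pyGetD pvN ((k : Int) + 1) 0 else maior)

def maiorElem_alt (t : Int) (maior : Int) : Int :=
  if t == 0 then 0
  else if t < 1 then maior else maiorElemLoop (t - 1).toNat maior

-- ===== PRECONDITION & SPEC =====
-- Pre_: exactly the inputs on which the Python A returns (elsewhere its recursion hits an IndexError on the 4-element n)
def Pre_maiorElem (t : Int) (maior : Int) : Prop := 0 ≤ t ∧ t ≤ 4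
instance (t : Int) (maior : Int) : Decidable (Pre_maiorElem t maior) := by unfold Pre_maiorElem; infer_instance
def pvWitness_maiorElem : Int × Int := (3, -10)

def Spec_maiorElem (t : Int) (maior : Int) (out : Int) : Prop := out = maiorElem_alt t maior
instance (t : Int) (maior : Int) (out : Int) : Decidable (Spec_maiorElem t maior out) := by unfold Spec_maiorElem; infer_instance

-- ===== CLAIM (what is proved, stated in full; the proofs are below) =====
def Claim_equal_maiorElem : Prop := ∀ (t : Int) (maior : Int), Dom_maiorElem t maior → Pre_maiorElem t maior → Spec_maiorElem t maior (maiorElem t maior)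

-- ===== LEMMAS AND PROOFS =====

-- ===== VERDICT (by name: the statement is the Claim_ definition above) =====
theorem maiorElem_spec : Claim_equal_maiorElem := by
  intro t maior _ hpre
  unfold Spec_maiorElem
  obtain ⟨h0, h4⟩ := hpre
  interval_cases t <;>
    simp [maiorElem, maiorElem_alt, maiorElemGo, maiorElemLoop, pvN,
      PySem.List.pyGet?, PySem.List.pyGetD, PySem.List.pyIdx?] <;>
    split_ifs <;> omega
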